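-- pv_equiv track=rewrite | github.com/nearo007/MIDI_project | get_scale.py | get_note_ids
-- ===== SOURCE A (Python) =====
-- def get_note_ids(mode=0, start=24, register=4):
--     note_ids = []
--
--     if mode == 0:
--         steps = [0, 2, 2, 1, 2, 2, 2, 1]
--
--     else:
--         steps = [0, 2, 1, 2, 2, 1, 2, 2]
--
--     current_id = start
--     for i in steps:
--         current_id += i
--         note_ids.append((current_id) + (register - 1) * 12)
--
--     return note_ids
-- ===== SOURCE B (Python) =====
-- # Scale degrees as fixed semitone-offset tables (closed form of the step sums),
-- # instead of summing interval steps at runtime.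
-- _MAJOR_OFFSETS = (0, 2, 4, 5, 7, 9, 11, 12)
-- _MINOR_OFFSETS = (0, 2, 3, 5, 7, 8, 10, 12)
--
-- def get_note_ids(mode=0, start=24, register=4):
--     offsets = _MAJOR_OFFSETS if mode == 0 else _MINOR_OFFSETS
--     base = start + (register - 1) * 12
--     return [base + o for o in offsets]
-- ===== Notes on version B (the rewrite author's own statement) =====
-- stated objective: simpler
-- what changed: Drops the runtime summation of interval steps entirely: B uses hard-coded semitone-offset tables (the closed-form cumulative sums of the major/natural-minor patterns) and a single offset-adding map.
import Mathlib
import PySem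

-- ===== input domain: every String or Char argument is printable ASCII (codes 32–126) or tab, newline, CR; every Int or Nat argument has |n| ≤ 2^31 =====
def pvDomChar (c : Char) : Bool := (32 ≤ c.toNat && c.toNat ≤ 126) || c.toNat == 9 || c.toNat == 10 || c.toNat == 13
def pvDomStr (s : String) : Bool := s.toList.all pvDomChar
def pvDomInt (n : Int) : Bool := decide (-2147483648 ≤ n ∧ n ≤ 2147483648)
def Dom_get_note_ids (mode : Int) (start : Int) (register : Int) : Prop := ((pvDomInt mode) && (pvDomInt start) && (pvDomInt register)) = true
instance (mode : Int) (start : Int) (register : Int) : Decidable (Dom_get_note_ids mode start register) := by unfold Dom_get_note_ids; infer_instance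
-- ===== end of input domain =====

-- B replaces A's step-summing loop with fixed semitone-offset tables (the closed-form cumulative sums) and one offset-adding map; same cost (objective: simpler).


-- ===== PORT A =====
-- for i in steps: current_id += i; note_ids.append(current_id + (register-1)*12)
def get_note_ids (mode : Int) (start : Int) (register : Int) : List Int :=
  let steps : List Int :=
    if mode == 0 then [0, 2, 2, 1, 2, 2, 2, 1] else [0, 2, 1, 2, 2, 1, 2, 2]
  (steps.foldl (fun (st : Int × List Int) i =>
      let current_id := st.1 + i
      (current_id, st.2 ++ [current_id + (register - 1) * 12])) (start, [])).2

-- ===== PORT B =====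
-- fixed semitone-offset tables; one offset-adding map
def pvMajorOffsets : List Int := [0, 2, 4, 5, 7, 9, 11, 12]
def pvMinorOffsets : List Int := [0, 2, 3, 5, 7, 8, 10, 12]

def get_note_ids_alt (mode : Int) (start : Int) (register : Int) : List Int :=
  let offsets := if mode == 0 then pvMajorOffsets else pvMinorOffsets
  let base := start + (register - 1) * 12
  offsets.map (fun o => base + o)

-- ===== PRECONDITION & SPEC =====
def Spec_get_note_ids (mode : Int) (start : Int) (register : Int) (out : List Int) : Prop := out = get_note_ids_alt mode start register
instance (mode : Int) (start : Int) (register : Int) (out : List Int) : Decidable (Spec_get_note_ids mode start register out) := by unfold Spec_get_note_ids; infer_instance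

-- ===== CLAIM =====
def Claim_equal_get_note_ids : Prop := ∀ (mode : Int) (start : Int) (register : Int), Dom_get_note_ids mode start register → Spec_get_note_ids mode start register (get_note_ids mode start register)

-- ===== LEMMAS AND PROOFS =====

-- ===== VERDICT =====
theorem get_note_ids_spec : Claim_equal_get_note_ids := by
  intro mode start register _
  unfold Spec_get_note_ids get_note_ids get_note_ids_alt pvMajorOffsets pvMinorOffsets
  by_cases h : mode == 0 <;>
    simp [h, List.foldl, List.map] <;> omega
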